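-- pv_equiv track=rewrite | github.com/MaratPereverzev/AOIS | Lab3/LogicExtended.py | findRectangleGroups
-- ===== SOURCE A (Python) =====
-- from typing import List, Set, Dict
--
-- def findRectangleGroups(
--     carnoTable: List[List[int]],
--     maxGroupSize: int,
--     grayHorizontal: List[str],
--     grayVertical: List[str],
--     isCNF=False,
-- ):
--     groups = []
--     visited = set()
--     rows = len(carnoTable)
--     cols = len(carnoTable[0]) if rows > 0 else 0
--
--     # Все возможные размеры прямоугольников (2^n × 2^m)
--     sizes = []
--     size = maxGroupSize
--     while size >= 1:
--         sizes.append(size)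
--         size //= 2
--
--     # Проверяем все возможные комбинации размеров
--     for height in sizes:
--         for width in sizes:
--             if height > rows or width > cols:
--                 continue
--
--             # Проверяем все возможные позиции с учётом тороидальности
--             for i in range(rows):
--                 for j in range(cols):
--                     all_correct = True
--                     current_group = []
--
--                     # Проверяем каждый пиксель в прямоугольнике
--                     for di in range(height):
--                         for dj in range(width):
--                             # Тороидальные координаты
--                             x = (i + di) % rows
--                             y = (j + dj) % cols
--
--                             # Проверка значения
--                             if (carnoTable[x][y] != 1 and not isCNF) or (
--                                 carnoTable[x][y] != 0 and isCNF
--                             ):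
--                                 all_correct = False
--                                 break
--
--                             # Добавляем переменную
--                             var = grayVertical[x] + grayHorizontal[y]
--                             current_group.append(var)
--
--                         if not all_correct:
--                             break
--
--                     # Добавляем группу, если она валидна и содержит новые переменные
--                     if all_correct:
--                         new_vars = [
--                             var for var in current_group if var not in visited
--                         ]
--                         if new_vars:
--                             groups.append(current_group)
--                             visited.update(new_vars)
--
--     # Оптимизация: объединяем смежные группы
--     merged_groups = []
--     for group in groups:
--         merged = False
--         for i, merged_group in enumerate(merged_groups):
--             if set(group).issubset(set(merged_group)):
--                 merged = True
--                 break
--             if set(merged_group).issubset(set(group)):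
--                 merged_groups[i] = group
--                 merged = True
--                 break
--         if not merged:
--             merged_groups.append(group)
--
--     return merged_groups
-- ===== SOURCE B (Python) =====
-- def findRectangleGroups(
--     carnoTable,
--     maxGroupSize,
--     grayHorizontal,
--     grayVertical,
--     isCNF=False,
-- ):
--     if maxGroupSize < 1:
--         return []
--     rows = len(carnoTable)
--     cols = len(carnoTable[0]) if rows > 0 else 0
--     target = 0 if isCNF else 1
--
--     # Per-row prefix counts of matching cells over the doubled (toroidal) row:
--     # pref[x][k] = number of matching cells among row x's doubled indices < k.
--     pref = []
--     for row in carnoTable: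
--         p = [0]
--         for y in range(2 * cols):
--             p.append(p[-1] + (1 if row[y % cols] == target else 0))
--         pref.append(p)
--
--     sizes = []
--     s = maxGroupSize
--     while s >= 1:
--         sizes.append(s)
--         s //= 2
--
--     groups = []
--     visited = set()
--     for height in sizes:
--         for width in sizes:
--             if height > rows or width > cols:
--                 continue
--             w = width
--             for i in range(rows):
--                 for j in range(cols):
--                     # O(1) per row: a width-w toroidal segment is all-matching
--                     # iff its prefix-count difference equals w.
--                     if all(
--                         pref[(i + di) % rows][j + w] - pref[(i + di) % rows][j] == w
--                         for di in range(height)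
--                     ):
--                         grp = [
--                             grayVertical[(i + di) % rows] + grayHorizontal[(j + dj) % cols]
--                             for di in range(height)
--                             for dj in range(width)
--                         ]
--                         if not visited.issuperset(grp):
--                             groups.append(grp)
--                             visited.update(grp)
--
--     merged = []
--     for g in groups:
--         merged = _absorb(merged, g)
--     return merged
--
--
-- def _absorb(ms, g):
--     if not ms:
--         return [g]
--     if set(g) <= set(ms[0]):
--         return ms
--     if set(ms[0]) <= set(g):
--         return [g] + ms[1:]
--     return [ms[0]] + _absorb(ms[1:], g)
-- ===== Notes on version B (the rewrite author's own statement) =====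
-- stated objective: alternative
-- what changed: B precomputes per-row toroidal prefix counts of matching cells once and validates each candidate rectangle with one prefix-difference test per row instead of A's per-pixel scan with breaks, and merges subsumed groups with a recursive absorb instead of A's indexed scan-and-replace loop; cost is dominated by building the output groups in both, so it is not measurably faster.
import Mathlib
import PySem

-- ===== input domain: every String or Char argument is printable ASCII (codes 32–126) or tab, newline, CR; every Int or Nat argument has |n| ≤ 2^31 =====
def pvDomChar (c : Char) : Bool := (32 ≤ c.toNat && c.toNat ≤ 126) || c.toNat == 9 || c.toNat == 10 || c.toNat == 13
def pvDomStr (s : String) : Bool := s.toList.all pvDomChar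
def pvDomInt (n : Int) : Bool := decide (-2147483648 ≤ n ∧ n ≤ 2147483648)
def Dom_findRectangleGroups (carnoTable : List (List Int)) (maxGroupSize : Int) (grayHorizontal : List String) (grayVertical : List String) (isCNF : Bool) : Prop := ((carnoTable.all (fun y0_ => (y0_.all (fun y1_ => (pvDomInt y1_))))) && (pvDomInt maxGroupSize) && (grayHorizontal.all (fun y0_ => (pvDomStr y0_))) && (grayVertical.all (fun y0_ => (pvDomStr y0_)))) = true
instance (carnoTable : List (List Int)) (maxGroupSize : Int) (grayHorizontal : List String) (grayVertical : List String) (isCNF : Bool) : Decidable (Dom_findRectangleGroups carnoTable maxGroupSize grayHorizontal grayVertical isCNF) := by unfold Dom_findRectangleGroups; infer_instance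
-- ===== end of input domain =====

-- B is an alternative algorithm: it validates each candidate rectangle with precomputed
-- per-row toroidal prefix counts (one prefix-difference test per row) instead of A's
-- per-pixel scan with breaks, and merges subsumed groups recursively; same results
-- (measured no faster: group construction dominates on group-rich inputs).


-- cols = len(carnoTable[0]) if rows > 0 else 0   (same expression in both Pythons)
def pvCols (carno : List (List Int)) : Nat :=
  match carno with
  | [] => 0
  | r :: _ => r.length

-- set(a).issubset(set(b))  — exact: every element of a occurs in b (same expression in both Pythons)
def pvSubsetL (a b : List String) : Bool := a.all (fun v => b.contains v)

-- sizes: size = maxGroupSize; while size >= 1: sizes.append(size); size //= 2   (same loop in both Pythons)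
def pvSizes (s : Int) : List Int :=
  if h : 1 ≤ s then s :: pvSizes (PySem.Int.floordiv s 2) else []
termination_by s.toNat
decreasing_by
  simp only [PySem.Int.floordiv_eq_ediv_of_pos (by omega : (0:Int) < 2)]
  omega

-- ===== PORT A =====

-- (carnoTable[x][y] != 1 and not isCNF) or (carnoTable[x][y] != 0 and isCNF)
def pvCellBad (v : Int) (c : Bool) : Bool := (!(v == 1) && !c) || (!(v == 0) && c)

-- inner 'for dj in range(width)' loop with its break, accumulating current_group
def pvARow (carno : List (List Int)) (gh gv : List String) (cols : Nat) (c : Bool)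
    (x j : Nat) (djs : List Nat) (acc : List String) : Bool × List String :=
  match djs with
  | [] => (true, acc)
  | dj :: rest =>
    let y := (j + dj) % cols
    if pvCellBad ((carno.getD x []).getD y 0) c then (false, acc)
    else pvARow carno gh gv cols c x j rest (acc ++ [gv.getD x "" ++ gh.getD y ""])

-- outer 'for di in range(height)' loop with 'if not all_correct: break'
def pvARect (carno : List (List Int)) (gh gv : List String) (rows cols : Nat) (c : Bool)
    (i j w : Nat) (dis : List Nat) (acc : List String) : Bool × List String :=
  match dis with
  | [] => (true, acc)
  | di :: rest =>
    let r := pvARow carno gh gv cols c ((i + di) % rows) j (List.range w) acc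
    if r.1 then pvARect carno gh gv rows cols c i j w rest r.2 else (false, r.2)

-- 'for i, merged_group in enumerate(merged_groups): …' — first index with a subset relation
def pvAMergeScan (g : List String) (pairs : List (List String × Nat)) : Option (Nat × Bool) :=
  match pairs with
  | [] => none
  | (mg, i) :: rest =>
    if pvSubsetL g mg then some (i, true)
    else if pvSubsetL mg g then some (i, false)
    else pvAMergeScan g rest

-- one pass of A's merge loop body: skip / merged_groups[i] = group / append
def pvAMergeOne (merged : List (List String)) (g : List String) : List (List String) :=
  match pvAMergeScan g merged.zipIdx with
  | none => merged ++ [g]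
  | some (_, true) => merged
  | some (i, false) => merged.set i g

def findRectangleGroups (carnoTable : List (List Int)) (maxGroupSize : Int) (grayHorizontal : List String) (grayVertical : List String) (isCNF : Bool) : List (List String) :=
  let rows := carnoTable.length
  let cols := pvCols carnoTable
  let sizes := pvSizes maxGroupSize
  let st := sizes.foldl (fun st height =>
    sizes.foldl (fun st width =>
      if (rows : Int) < height || (cols : Int) < width then st
      else
        (List.range rows).foldl (fun st i =>
          (List.range cols).foldl (fun st j =>
            let r := pvARect carnoTable grayHorizontal grayVertical rows cols isCNF
                       i j width.toNat (List.range height.toNat) []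
            if r.1 then
              let newVars := r.2.filter (fun v => !(PySem.Set.contains st.2 v))
              if newVars.isEmpty then st
              else (st.1 ++ [r.2], PySem.Set.update st.2 newVars)
            else st) st) st) st)
    (([] : List (List String)), (PySem.Set.empty : PySem.Set String))
  st.1.foldl pvAMergeOne []

-- ===== PORT B =====

-- p = [0]; for y in range(2*cols): p.append(p[-1] + (1 if row[y % cols] == target else 0))
def pvBPrefRow (row : List Int) (cols : Nat) (t : Int) : List Int :=
  (List.range (2 * cols)).foldl
    (fun p y => p ++ [p.getLastD 0 + (if row.getD (y % cols) 0 == t then 1 else 0)]) [0]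

-- _absorb(ms, g): recursive subsumption merge
def pvAbsorb (ms : List (List String)) (g : List String) : List (List String) :=
  match ms with
  | [] => [g]
  | m :: rest =>
    if pvSubsetL g m then m :: rest
    else if pvSubsetL m g then g :: rest
    else m :: pvAbsorb rest g

def findRectangleGroups_alt (carnoTable : List (List Int)) (maxGroupSize : Int) (grayHorizontal : List String) (grayVertical : List String) (isCNF : Bool) : List (List String) :=
  if maxGroupSize < 1 then [] else
  let rows := carnoTable.length
  let cols := pvCols carnoTable
  let target : Int := if isCNF then 0 else 1
  let pref := carnoTable.map (fun row => pvBPrefRow row cols target)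
  let sizes := pvSizes maxGroupSize
  let st := sizes.foldl (fun st height =>
    sizes.foldl (fun st width =>
      if (rows : Int) < height || (cols : Int) < width then st
      else
        let w := width.toNat
        (List.range rows).foldl (fun st i =>
          (List.range cols).foldl (fun st j =>
            if (List.range height.toNat).all (fun di =>
                 ((pref.getD ((i + di) % rows) []).getD (j + w) 0
                   - (pref.getD ((i + di) % rows) []).getD j 0) == (w : Int)) then
              let grp := (List.range height.toNat).flatMap (fun di =>
                (List.range w).map (fun dj =>
                  grayVertical.getD ((i + di) % rows) "" ++ grayHorizontal.getD ((j + dj) % cols) ""))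
              if PySem.Set.issuperset st.2 grp then st
              else (st.1 ++ [grp], PySem.Set.update st.2 grp)
            else st) st) st) st)
    (([] : List (List String)), (PySem.Set.empty : PySem.Set String))
  st.1.foldl pvAbsorb []

-- ===== PRECONDITION & SPEC =====
-- Pre_ excludes exactly the inputs where A raises IndexError: with an admissible group size
-- (maxGroupSize ≥ 1) the 1×1 scan touches every cell of every row up to cols, so rows shorter
-- than cols raise, and every cell equal to the target value makes A read its gray-code labels,
-- so a matching cell beyond the label lists raises.  (With maxGroupSize < 1 A touches nothing.)
def Pre_findRectangleGroups (carnoTable : List (List Int)) (maxGroupSize : Int) (grayHorizontal : List String) (grayVertical : List String) (isCNF : Bool) : Prop :=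
  1 ≤ maxGroupSize →
    ((∀ row ∈ carnoTable, pvCols carnoTable ≤ row.length) ∧
     ∀ x < carnoTable.length, ∀ y < pvCols carnoTable,
       (carnoTable.getD x []).getD y 0 = (if isCNF then 0 else 1) →
         x < grayVertical.length ∧ y < grayHorizontal.length)
instance (carnoTable : List (List Int)) (maxGroupSize : Int) (grayHorizontal : List String) (grayVertical : List String) (isCNF : Bool) : Decidable (Pre_findRectangleGroups carnoTable maxGroupSize grayHorizontal grayVertical isCNF) := by unfold Pre_findRectangleGroups; infer_instance

def pvWitness_findRectangleGroups : List (List Int) × Int × List String × List String × Bool :=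
  ([[1, 0], [0, 1]], 2, ["0", "1"], ["0", "1"], false)

def Spec_findRectangleGroups (carnoTable : List (List Int)) (maxGroupSize : Int) (grayHorizontal : List String) (grayVertical : List String) (isCNF : Bool) (out : List (List String)) : Prop := out = findRectangleGroups_alt carnoTable maxGroupSize grayHorizontal grayVertical isCNF
instance (carnoTable : List (List Int)) (maxGroupSize : Int) (grayHorizontal : List String) (grayVertical : List String) (isCNF : Bool) (out : List (List String)) : Decidable (Spec_findRectangleGroups carnoTable maxGroupSize grayHorizontal grayVertical isCNF out) := by unfold Spec_findRectangleGroups; infer_instance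

-- ===== CLAIM (what is proved, stated in full; the proofs are below) =====
def Claim_equal_findRectangleGroups : Prop := ∀ (carnoTable : List (List Int)) (maxGroupSize : Int) (grayHorizontal : List String) (grayVertical : List String) (isCNF : Bool), Dom_findRectangleGroups carnoTable maxGroupSize grayHorizontal grayVertical isCNF → Pre_findRectangleGroups carnoTable maxGroupSize grayHorizontal grayVertical isCNF → Spec_findRectangleGroups carnoTable maxGroupSize grayHorizontal grayVertical isCNF (findRectangleGroups carnoTable maxGroupSize grayHorizontal grayVertical isCNF)

-- ===== LEMMAS AND PROOFS =====

-- count of matching cells among the first k doubled indices of a row (proof-side spec of pvBPrefRow)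
def pvCnt (row : List Int) (cols : Nat) (t : Int) : Nat → Int
  | 0 => 0
  | k+1 => pvCnt row cols t k + (if row.getD (k % cols) 0 == t then 1 else 0)

theorem pvBPrefRow_eq (row : List Int) (cols : Nat) (t : Int) :
    pvBPrefRow row cols t = (List.range (2 * cols + 1)).map (pvCnt row cols t) := by
  have key : ∀ n, (List.range n).foldl
      (fun p y => p ++ [p.getLastD 0 + (if row.getD (y % cols) 0 == t then 1 else 0)]) [0]
      = (List.range (n + 1)).map (pvCnt row cols t) := by
    intro n
    induction n with
    | zero => simp [pvCnt]
    | succ n ih =>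
      rw [List.range_succ, List.foldl_append, ih]
      rw [List.range_succ (n := n + 1), List.map_append, List.map_singleton]
      have hlast : ((List.range (n + 1)).map (pvCnt row cols t)).getLastD 0
          = pvCnt row cols t n := by
        rw [List.range_succ, List.map_append, List.map_singleton, List.getLastD_concat]
      simp only [List.foldl_cons, List.foldl_nil, hlast]
      simp [pvCnt]
  exact key (2 * cols)

theorem pvCnt_diff_bounds (row : List Int) (cols : Nat) (t : Int) (j : Nat) :
    ∀ w : Nat, 0 ≤ pvCnt row cols t (j + w) - pvCnt row cols t j ∧
      pvCnt row cols t (j + w) - pvCnt row cols t j ≤ w := by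
  intro w
  induction w with
  | zero => simp
  | succ w ih =>
    rw [show j + (w + 1) = (j + w) + 1 from rfl]
    simp only [pvCnt]
    split <;> push_cast <;> omega

theorem pvCnt_diff_eq_iff (row : List Int) (cols : Nat) (t : Int) (j : Nat) :
    ∀ w : Nat, (pvCnt row cols t (j + w) - pvCnt row cols t j = (w : Int)) ↔
      (∀ dj < w, row.getD ((j + dj) % cols) 0 = t) := by
  intro w
  induction w with
  | zero => simp
  | succ w ih =>
    have hb := pvCnt_diff_bounds row cols t j w
    rw [show j + (w + 1) = (j + w) + 1 from rfl]
    simp only [pvCnt]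
    by_cases hc : row.getD ((j + w) % cols) 0 = t
    · rw [if_pos (beq_iff_eq.mpr hc)]
      constructor
      · intro h dj hdj
        have hw' : pvCnt row cols t (j + w) - pvCnt row cols t j = (w : Int) := by
          push_cast at h ⊢; omega
        rcases Nat.lt_succ_iff_lt_or_eq.mp hdj with h' | h'
        · exact ih.mp hw' dj h'
        · subst h'; exact hc
      · intro h
        have hw' := ih.mpr (fun dj hdj => h dj (by omega))
        push_cast at hw' ⊢; omega
    · rw [if_neg (by simpa using hc)]
      constructor
      · intro h; exfalso; push_cast at h; omega
      · intro h; exact absurd (h w (by omega)) hc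

theorem pvPref_check (row : List Int) (cols : Nat) (t : Int) (j w : Nat)
    (hj : j < cols) (hw : w ≤ cols) :
    (((pvBPrefRow row cols t).getD (j + w) 0 - (pvBPrefRow row cols t).getD j 0) == (w : Int))
      = (List.range w).all (fun dj => row.getD ((j + dj) % cols) 0 == t) := by
  rw [pvBPrefRow_eq]
  have h1 : j + w < 2 * cols + 1 := by omega
  have h2 : j < 2 * cols + 1 := by omega
  rw [List.getD_eq_getElem?_getD, List.getD_eq_getElem?_getD]
  rw [List.getElem?_map, List.getElem?_map]
  rw [List.getElem?_range h1, List.getElem?_range h2]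
  simp only [Option.map_some, Option.getD_some]
  rw [Bool.eq_iff_iff]
  simp only [beq_iff_eq, List.all_eq_true, List.mem_range]
  exact pvCnt_diff_eq_iff row cols t j w

theorem pvCellGood (v : Int) (c : Bool) :
    (!pvCellBad v c) = (v == (if c then (0 : Int) else 1)) := by
  cases c <;> simp [pvCellBad]

theorem pvARow_fst (carno : List (List Int)) (gh gv : List String) (cols : Nat) (c : Bool)
    (x j : Nat) : ∀ (djs : List Nat) (acc : List String),
    (pvARow carno gh gv cols c x j djs acc).1
      = djs.all (fun dj => !pvCellBad ((carno.getD x []).getD ((j + dj) % cols) 0) c) := by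
  intro djs
  induction djs with
  | nil => intro acc; rfl
  | cons dj rest ih =>
    intro acc
    simp only [pvARow, List.all_cons]
    by_cases hb : pvCellBad ((carno.getD x []).getD ((j + dj) % cols) 0) c = true
    · rw [if_pos hb, hb]
      simp
    · rw [if_neg hb, ih]
      simp only [Bool.not_eq_true] at hb
      rw [hb]
      simp

theorem pvARow_all (carno : List (List Int)) (gh gv : List String) (cols : Nat) (c : Bool)
    (x j : Nat) : ∀ (djs : List Nat) (acc : List String),
    (∀ dj ∈ djs, pvCellBad ((carno.getD x []).getD ((j + dj) % cols) 0) c = false) →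
    pvARow carno gh gv cols c x j djs acc
      = (true, acc ++ djs.map (fun dj => gv.getD x "" ++ gh.getD ((j + dj) % cols) "")) := by
  intro djs
  induction djs with
  | nil => intro acc _; simp [pvARow]
  | cons dj rest ih =>
    intro acc h
    simp only [pvARow, h dj (by simp)]
    rw [ih _ (fun d hd => h d (by simp [hd]))]
    simp

theorem pvARect_fst (carno : List (List Int)) (gh gv : List String) (rows cols : Nat) (c : Bool)
    (i j w : Nat) : ∀ (dis : List Nat) (acc : List String),
    (pvARect carno gh gv rows cols c i j w dis acc).1
      = dis.all (fun di => (List.range w).all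
          (fun dj => !pvCellBad ((carno.getD ((i + di) % rows) []).getD ((j + dj) % cols) 0) c)) := by
  intro dis
  induction dis with
  | nil => intro acc; rfl
  | cons di rest ih =>
    intro acc
    simp only [pvARect, List.all_cons]
    rw [pvARow_fst]
    by_cases hr : ((List.range w).all
        (fun dj => !pvCellBad ((carno.getD ((i + di) % rows) []).getD ((j + dj) % cols) 0) c)) = true
    · rw [if_pos hr, ih, hr]
      simp
    · rw [if_neg hr]
      simp only [Bool.not_eq_true] at hr
      rw [hr]
      simp

theorem pvARect_all (carno : List (List Int)) (gh gv : List String) (rows cols : Nat) (c : Bool)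
    (i j w : Nat) : ∀ (dis : List Nat) (acc : List String),
    (∀ di ∈ dis, ∀ dj ∈ List.range w,
        pvCellBad ((carno.getD ((i + di) % rows) []).getD ((j + dj) % cols) 0) c = false) →
    pvARect carno gh gv rows cols c i j w dis acc
      = (true, acc ++ dis.flatMap (fun di => (List.range w).map
          (fun dj => gv.getD ((i + di) % rows) "" ++ gh.getD ((j + dj) % cols) ""))) := by
  intro dis
  induction dis with
  | nil => intro acc _; simp [pvARect]
  | cons di rest ih =>
    intro acc h
    simp only [pvARect]
    rw [pvARow_all carno gh gv cols c ((i + di) % rows) j (List.range w) acc (h di (by simp))]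
    rw [ih _ (fun d hd => h d (by simp [hd]))]
    simp

theorem pvGetD_map_lt {α β : Type} (f : α → β) (l : List α) (n : Nat) (d : β) (d' : α)
    (h : n < l.length) : (l.map f).getD n d = f (l.getD n d') := by
  rw [List.getD_eq_getElem?_getD, List.getD_eq_getElem?_getD, List.getElem?_map]
  rw [List.getElem?_eq_getElem h]
  simp

theorem pvIsEmpty_filter (s : PySem.Set String) (grp : List String) :
    (grp.filter (fun v => !PySem.Set.contains s v)).isEmpty = PySem.Set.issuperset s grp := by
  rw [Bool.eq_iff_iff]
  rw [PySem.Set.issuperset_iff]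
  simp [List.isEmpty_iff, List.filter_eq_nil_iff, PySem.Set.contains_iff]

theorem pvUpdate_filter (s₀ : PySem.Set String) : ∀ (grp : List String) (s : PySem.Set String),
    (∀ v ∈ s₀, v ∈ s) →
    PySem.Set.update s (grp.filter (fun v => !PySem.Set.contains s₀ v)) = PySem.Set.update s grp := by
  intro grp
  induction grp with
  | nil => intro s _; rfl
  | cons v rest ih =>
    intro s hs
    by_cases hv : v ∈ s₀
    · have hc : PySem.Set.contains s₀ v = true := (PySem.Set.contains_iff _ _).mpr hv
      have hf : List.filter (fun u => !PySem.Set.contains s₀ u) (v :: rest)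
          = List.filter (fun u => !PySem.Set.contains s₀ u) rest := by
        simp [List.filter_cons, hc, hv]
      rw [hf, PySem.Set.update_cons, PySem.Set.add_of_mem (hs v hv)]
      exact ih s hs
    · have hc : PySem.Set.contains s₀ v = false := by
        rw [← Bool.not_eq_true, PySem.Set.contains_iff]; exact hv
      have hf : List.filter (fun u => !PySem.Set.contains s₀ u) (v :: rest)
          = v :: List.filter (fun u => !PySem.Set.contains s₀ u) rest := by
        simp [List.filter_cons, hc, hv]
      rw [hf, PySem.Set.update_cons, PySem.Set.update_cons]
      exact ih _ (fun u hu => by rw [PySem.Set.mem_add]; exact Or.inl (hs u hu))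

theorem pvStep_eq (carno : List (List Int)) (gh gv : List String) (c : Bool)
    (hn wn i j : Nat) (hi : i < carno.length) (hj : j < pvCols carno) (hw : wn ≤ pvCols carno)
    (st : List (List String) × PySem.Set String) :
    (let r := pvARect carno gh gv carno.length (pvCols carno) c i j wn (List.range hn) [];
     if r.1 then
       let newVars := r.2.filter (fun v => !(PySem.Set.contains st.2 v))
       if newVars.isEmpty then st
       else (st.1 ++ [r.2], PySem.Set.update st.2 newVars)
     else st)
    =
    (if (List.range hn).all (fun di =>
         (((carno.map (fun row => pvBPrefRow row (pvCols carno) (if c then 0 else 1))).getD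
             ((i + di) % carno.length) []).getD (j + wn) 0
           - ((carno.map (fun row => pvBPrefRow row (pvCols carno) (if c then 0 else 1))).getD
             ((i + di) % carno.length) []).getD j 0) == (wn : Int)) then
       let grp := (List.range hn).flatMap (fun di => (List.range wn).map (fun dj =>
         gv.getD ((i + di) % carno.length) "" ++ gh.getD ((j + dj) % pvCols carno) ""))
       if PySem.Set.issuperset st.2 grp then st
       else (st.1 ++ [grp], PySem.Set.update st.2 grp)
     else st) := by
  have hrows : 0 < carno.length := by omega
  have hBcond : ∀ di : Nat,
      ((((carno.map (fun row => pvBPrefRow row (pvCols carno) (if c then 0 else 1))).getD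
          ((i + di) % carno.length) []).getD (j + wn) 0
        - ((carno.map (fun row => pvBPrefRow row (pvCols carno) (if c then 0 else 1))).getD
          ((i + di) % carno.length) []).getD j 0) == (wn : Int))
      = (List.range wn).all (fun dj =>
          !pvCellBad ((carno.getD ((i + di) % carno.length) []).getD ((j + dj) % pvCols carno) 0) c) := by
    intro di
    have hx : (i + di) % carno.length < carno.length := Nat.mod_lt _ hrows
    rw [pvGetD_map_lt _ _ _ _ [] hx]
    rw [pvPref_check _ _ _ _ _ hj hw]
    congr 1
    funext dj
    exact (pvCellGood _ _).symm
  have hTop :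
      ((List.range hn).all (fun di =>
        (((carno.map (fun row => pvBPrefRow row (pvCols carno) (if c then 0 else 1))).getD
            ((i + di) % carno.length) []).getD (j + wn) 0
          - ((carno.map (fun row => pvBPrefRow row (pvCols carno) (if c then 0 else 1))).getD
            ((i + di) % carno.length) []).getD j 0) == (wn : Int)))
      = ((List.range hn).all (fun di => (List.range wn).all (fun dj =>
          !pvCellBad ((carno.getD ((i + di) % carno.length) []).getD ((j + dj) % pvCols carno) 0) c))) := by
    congr 1
    funext di
    exact hBcond di
  show _ = _
  rw [hTop]
  by_cases hall : (List.range hn).all (fun di => (List.range wn).all (fun dj =>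
      !pvCellBad ((carno.getD ((i + di) % carno.length) []).getD ((j + dj) % pvCols carno) 0) c)) = true
  · have hcells : ∀ di ∈ List.range hn, ∀ dj ∈ List.range wn,
        pvCellBad ((carno.getD ((i + di) % carno.length) []).getD ((j + dj) % pvCols carno) 0) c
          = false := by
      intro di hdi dj hdj
      have := (List.all_eq_true.mp hall) di hdi
      have := (List.all_eq_true.mp this) dj hdj
      simpa using this
    have hr := pvARect_all carno gh gv carno.length (pvCols carno) c i j wn (List.range hn) [] hcells
    simp only [hr, hall, if_pos, List.nil_append]
    rw [pvIsEmpty_filter st.2]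
    rw [pvUpdate_filter st.2 _ st.2 (fun _ h => h)]
  · have hf : (pvARect carno gh gv carno.length (pvCols carno) c i j wn (List.range hn) []).1
        = false := by
      rw [pvARect_fst]
      simpa using hall
    simp only [hf, Bool.false_eq_true, if_neg, hall]
    simp [hall]

theorem pvScan_shift (g : List String) : ∀ (l : List (List String)) (k : Nat),
    pvAMergeScan g (l.zipIdx (k + 1))
      = (pvAMergeScan g (l.zipIdx k)).map (fun p => (p.1 + 1, p.2)) := by
  intro l
  induction l with
  | nil => intro k; rfl
  | cons m rest ih =>
    intro k
    simp only [List.zipIdx_cons, pvAMergeScan]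
    by_cases h1 : pvSubsetL g m = true
    · simp [h1]
    · by_cases h2 : pvSubsetL m g = true
      · simp [h1, h2]
      · simp only [h1, h2, Bool.false_eq_true, if_neg, if_false]
        exact ih (k + 1)

theorem pvMergeOne_eq : ∀ (merged : List (List String)) (g : List String),
    pvAMergeOne merged g = pvAbsorb merged g := by
  intro merged
  induction merged with
  | nil => intro g; rfl
  | cons m rest ih =>
    intro g
    unfold pvAMergeOne pvAbsorb
    simp only [List.zipIdx_cons, pvAMergeScan]
    by_cases h1 : pvSubsetL g m = true
    · simp [h1]
    · by_cases h2 : pvSubsetL m g = true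
      · simp [h1, h2]
      · simp only [h1, h2, Bool.false_eq_true, if_neg, if_false]
        rw [pvScan_shift g rest 0]
        have ih' := ih g
        unfold pvAMergeOne at ih'
        cases h0 : pvAMergeScan g (rest.zipIdx 0) with
        | none =>
          rw [h0] at ih'
          simp [← ih']
        | some p =>
          rcases p with ⟨idx, b⟩
          rw [h0] at ih'
          cases b with
          | true => simp [← ih']
          | false =>
            simp only [Option.map_some]
            rw [← ih']
            simp [List.set_cons_succ]

theorem pvMergeFold : ∀ (gs : List (List String)) (acc : List (List String)),
    gs.foldl pvAMergeOne acc = gs.foldl pvAbsorb acc := by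
  intro gs acc
  apply PySem.List.foldl_congr_mem
  intro a x _
  exact pvMergeOne_eq a x

-- ===== VERDICT (by name: the statement is the Claim_ definition above) =====
theorem findRectangleGroups_spec : Claim_equal_findRectangleGroups := by
  unfold Claim_equal_findRectangleGroups
  intro carno mg gh gv c _dom _pre
  unfold Spec_findRectangleGroups findRectangleGroups findRectangleGroups_alt
  dsimp only
  by_cases hmg : mg < 1
  · have hs : pvSizes mg = [] := by
      unfold pvSizes
      simp [show ¬ (1 ≤ mg) by omega]
    simp [hs, hmg]
  · rw [if_neg hmg]
    have hst :
        (pvSizes mg).foldl (fun st height =>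
          (pvSizes mg).foldl (fun st width =>
            if (carno.length : Int) < height || ((pvCols carno : Int) < width) then st
            else
              (List.range carno.length).foldl (fun st i =>
                (List.range (pvCols carno)).foldl (fun st j =>
                  let r := pvARect carno gh gv carno.length (pvCols carno) c
                             i j width.toNat (List.range height.toNat) []
                  if r.1 then
                    let newVars := r.2.filter (fun v => !(PySem.Set.contains st.2 v))
                    if newVars.isEmpty then st
                    else (st.1 ++ [r.2], PySem.Set.update st.2 newVars)
                  else st) st) st) st)
          (([] : List (List String)), (PySem.Set.empty : PySem.Set String))
        =
        (pvSizes mg).foldl (fun st height =>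
          (pvSizes mg).foldl (fun st width =>
            if (carno.length : Int) < height || ((pvCols carno : Int) < width) then st
            else
              let w := width.toNat
              (List.range carno.length).foldl (fun st i =>
                (List.range (pvCols carno)).foldl (fun st j =>
                  if (List.range height.toNat).all (fun di =>
                       (((carno.map (fun row => pvBPrefRow row (pvCols carno) (if c then 0 else 1))).getD
                           ((i + di) % carno.length) []).getD (j + w) 0
                         - ((carno.map (fun row => pvBPrefRow row (pvCols carno) (if c then 0 else 1))).getD
                           ((i + di) % carno.length) []).getD j 0) == (w : Int)) then
                    let grp := (List.range height.toNat).flatMap (fun di =>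
                      (List.range w).map (fun dj =>
                        gv.getD ((i + di) % carno.length) "" ++ gh.getD ((j + dj) % pvCols carno) ""))
                    if PySem.Set.issuperset st.2 grp then st
                    else (st.1 ++ [grp], PySem.Set.update st.2 grp)
                  else st) st) st) st)
          (([] : List (List String)), (PySem.Set.empty : PySem.Set String)) := by
      apply PySem.List.foldl_congr_mem
      intro acc height _
      apply PySem.List.foldl_congr_mem
      intro acc2 width _
      by_cases hg : ((carno.length : Int) < height || ((pvCols carno : Int) < width) : Bool) = true
      · simp only [hg, if_pos]
      · simp only [hg, Bool.false_eq_true, if_neg]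
        have hwle : width.toNat ≤ pvCols carno := by
          simp only [Bool.or_eq_true, decide_eq_true_eq, not_or] at hg
          omega
        apply PySem.List.foldl_congr_mem
        intro acc3 i hi
        apply PySem.List.foldl_congr_mem
        intro acc4 j hj
        exact pvStep_eq carno gh gv c height.toNat width.toNat i j
          (List.mem_range.mp hi) (List.mem_range.mp hj) hwle acc4
    rw [hst]
    rw [pvMergeFold]
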